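-- pv_equiv track=rewrite | github.com/jhonshua/Python-Tkinter | modulos/reportes/generador_reportes.py | obtener_hora_pico
-- ===== SOURCE A (Python) =====
-- def obtener_hora_pico(ventas):
--     """Obtener la hora de mayor actividad"""
--     if not ventas:
--         return "N/A"
--
--     horas = {}
--     for venta in ventas:
--         if len(venta) > 8 and venta[8]:  # Si hay campo hora
--             hora = str(venta[8])[:2]  # Primeros 2 caracteres de la hora
--             horas[hora] = horas.get(hora, 0) + 1
--
--     if horas:
--         hora_pico = max(horas, key=horas.get)
--         return f"{hora_pico}:00"
--     return "N/A"
-- ===== SOURCE B (Python) =====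
-- def obtener_hora_pico(ventas):
--     """Obtener la hora de mayor actividad"""
--     restante = [str(v[8])[:2] for v in ventas if len(v) > 8 and v[8]]
--     if not restante:
--         return "N/A"
--     mejor, mejor_n = "", 0
--     while restante:
--         h = restante[0]
--         resto = [x for x in restante if x != h]
--         n = len(restante) - len(resto)
--         if n > mejor_n:
--             mejor, mejor_n = h, n
--         restante = resto
--     return f"{mejor}:00"
-- ===== Notes on version B (the rewrite author's own statement) =====
-- stated objective: alternative
-- what changed: Replaces A's maintained frequency dictionary plus max(dict, key=dict.get) with the successive-deletion mode algorithm: repeatedly take the first remaining hour, delete all its occurrences, obtain its count as the length difference, and keep the strictly-best run, which breaks ties on earliest first occurrence exactly like dict insertion order.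
import Mathlib
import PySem

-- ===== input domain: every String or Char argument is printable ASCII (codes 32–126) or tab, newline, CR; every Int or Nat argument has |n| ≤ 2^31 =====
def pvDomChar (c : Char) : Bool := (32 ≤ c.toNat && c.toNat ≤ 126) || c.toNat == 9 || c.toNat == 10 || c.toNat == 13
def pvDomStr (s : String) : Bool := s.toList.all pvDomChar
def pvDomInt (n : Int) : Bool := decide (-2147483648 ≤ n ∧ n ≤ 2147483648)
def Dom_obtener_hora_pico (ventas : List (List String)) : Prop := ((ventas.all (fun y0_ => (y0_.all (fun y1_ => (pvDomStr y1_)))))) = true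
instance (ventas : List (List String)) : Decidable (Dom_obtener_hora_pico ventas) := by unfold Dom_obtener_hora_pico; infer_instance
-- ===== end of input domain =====

-- B replaces A's frequency dictionary + max(…, key=…) by the successive-deletion mode
-- algorithm: repeatedly strip the first remaining hour's duplicates and compare run sizes
-- obtained as length differences (alternative decomposition; not faster).

-- ===== PORT A =====
-- 'horas[hora] = horas.get(hora, 0) + 1' is ported as Dict.modify hora 0 (· + 1);
-- 'max(horas, key=horas.get)' iterates the keys, and on a present key horas.get = getD · 0;
-- the loop guard guarantees the keys list is nonempty there, so '.getD ""' only totalizes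
-- the Option that PySem.List.max? returns (Python max cannot raise on a nonempty dict).
def obtener_hora_pico (ventas : List (List String)) : String :=
  if ventas = [] then "N/A"
  else
    let horas : PySem.Dict String Int :=
      ventas.foldl (fun d venta =>
        if 8 < venta.length ∧ PySem.List.pyGetD venta 8 "" ≠ "" then
          d.modify (PySem.Str.slice (PySem.List.pyGetD venta 8 "") none (some 2)) 0 (fun n => n + 1)
        else d) PySem.Dict.empty
    if horas.keys ≠ [] then
      ((PySem.List.max? horas.keys (fun h => horas.getD h 0)).getD "") ++ ":00"
    else "N/A"

-- ===== PORT B =====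
-- the 'while restante:' loop of Source B; terminates because resto drops the head
def pvLoopB : List String → String → Int → String
  | [], mejor, _ => mejor
  | x :: t, mejor, mejor_n =>
    let resto := (x :: t).filter (fun y => decide (y ≠ x))
    let n : Int := ((x :: t).length : Int) - (resto.length : Int)
    if mejor_n < n then pvLoopB resto x n else pvLoopB resto mejor mejor_n
  termination_by l _ _ => l.length
  decreasing_by
  · simp only [List.filter_cons, decide_not]
    exact Nat.lt_succ_of_le (by simp [List.length_filter_le])
  · simp only [List.filter_cons, decide_not]
    exact Nat.lt_succ_of_le (by simp [List.length_filter_le])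

def obtener_hora_pico_alt (ventas : List (List String)) : String :=
  let restante : List String :=
    (ventas.filter (fun v => decide (8 < v.length ∧ PySem.List.pyGetD v 8 "" ≠ ""))).map
      (fun v => PySem.Str.slice (PySem.List.pyGetD v 8 "") none (some 2))
  if restante = [] then "N/A"
  else pvLoopB restante "" 0 ++ ":00"

-- ===== PRECONDITION & SPEC =====
def Spec_obtener_hora_pico (ventas : List (List String)) (out : String) : Prop := out = obtener_hora_pico_alt ventas
instance (ventas : List (List String)) (out : String) : Decidable (Spec_obtener_hora_pico ventas out) := by unfold Spec_obtener_hora_pico; infer_instance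

-- ===== CLAIM (what is proved, stated in full; the proofs are below) =====
def Claim_equal_obtener_hora_pico : Prop := ∀ (ventas : List (List String)), Dom_obtener_hora_pico ventas → Spec_obtener_hora_pico ventas (obtener_hora_pico ventas)

-- ===== LEMMAS AND PROOFS =====

-- a filtered-accumulation loop equals the same fold over the filtered-and-mapped list
theorem pvFoldlIfComp {α β γ : Type} (p : α → Prop) [DecidablePred p] (f : α → β)
    (g : γ → β → γ) : ∀ (l : List α) (a : γ),
    l.foldl (fun a x => if p x then g a (f x) else a) a
      = ((l.filter (fun x => decide (p x))).map f).foldl g a := by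
  intro l
  induction l with
  | nil => intro a; rfl
  | cons x t ih =>
    intro a
    by_cases hx : p x <;> simp [hx, ih]

-- the step of Python's max(xs, key=c)
def pvStep (c : String → Int) (acc : Option String) (x : String) : Option String :=
  match acc with
  | none => some x
  | some m => if c m < c x then some x else some m

theorem pvFoldlExt {α β : Type} (g₁ g₂ : β → α → β) (h : ∀ acc x, g₁ acc x = g₂ acc x) :
    ∀ (l : List α) (acc : β), l.foldl g₁ acc = l.foldl g₂ acc := by
  intro l
  induction l with
  | nil => intro acc; rfl
  | cons x t ih => intro acc; rw [List.foldl_cons, List.foldl_cons, h, ih]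

theorem pvMaxEqFoldStep (c : String → Int) (xs : List String) :
    PySem.List.max? xs c = xs.foldl (pvStep c) none := by
  simp only [PySem.List.max?]
  exact pvFoldlExt _ _ (fun acc x => by cases acc <;> rfl) xs none

-- the argmax recursion both ports reduce to: a running (best, best key) pair
def pvArg : List (String × Int) → String → Int → String
  | [], m, _ => m
  | (h, n) :: t, m, c => if c < n then pvArg t h n else pvArg t m c

theorem pvFoldStepEqArg (key : String → Int) :
    ∀ (t : List String) (m : String),
    t.foldl (pvStep key) (some m) = some (pvArg (t.map (fun h => (h, key h))) m (key m)) := by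
  intro t
  induction t with
  | nil => intro m; rfl
  | cons x t ih =>
    intro m
    by_cases hx : key m < key x <;> simp [pvStep, pvArg, hx, ih]

theorem pvLenFilterNe (x : String) :
    ∀ (t : List String), (t.filter (fun y => decide (y ≠ x))).length + List.count x t = t.length := by
  intro t
  induction t with
  | nil => rfl
  | cons y t ih =>
    by_cases hy : y = x
    · subst hy
      rw [List.filter_cons_of_neg (by simp), List.count_cons_self, List.length_cons]
      omega
    · rw [List.filter_cons_of_pos (by simp [hy]), List.length_cons, List.length_cons,
        List.count_cons_of_ne hy]
      omega

theorem pvSetAddNotMem (s : List String) (x : String) (hx : x ∉ s) :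
    PySem.Set.add s x = s ++ [x] := by
  simp [PySem.Set.add, hx]

theorem pvSetAddMem (s : List String) (x : String) (hx : x ∈ s) :
    PySem.Set.add s x = s := by
  simp [PySem.Set.add, hx]

-- the argmax recursion unfolded one step
theorem pvArgCons (h : String) (n : Int) (t : List (String × Int)) (m : String) (c : Int) :
    pvArg ((h, n) :: t) m c = if c < n then pvArg t h n else pvArg t m c := rfl

-- Set.update ignores occurrences of an element already present
theorem pvUpdateFilter (x : String) :
    ∀ (t s : List String), x ∈ s →
    PySem.Set.update s (t.filter (fun y => decide (y ≠ x))) = PySem.Set.update s t := by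
  intro t
  induction t with
  | nil => intro s _; rfl
  | cons y t ih =>
    intro s hx
    by_cases hy : y = x
    · subst hy
      have : PySem.Set.update s (y :: t) = PySem.Set.update (PySem.Set.add s y) t := rfl
      rw [List.filter_cons_of_neg (by simp), this, pvSetAddMem s y hx]
      exact ih s hx
    · rw [List.filter_cons_of_pos (by simp [hy])]
      show PySem.Set.update (PySem.Set.add s y) (t.filter _) = PySem.Set.update (PySem.Set.add s y) t
      apply ih
      by_cases hys : y ∈ s
      · rw [pvSetAddMem s y hys]; exact hx
      · rw [pvSetAddNotMem s y hys]; exact List.mem_append_left _ hx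

-- an element absent from l can be pulled out in front of Set.update
theorem pvUpdateConsOut (x : String) :
    ∀ (l s : List String), x ∉ l → x ∉ s →
    PySem.Set.update (x :: s) l = x :: PySem.Set.update s l := by
  intro l
  induction l with
  | nil => intro s _ _; rfl
  | cons y l ih =>
    intro s hxl hxs
    have hxy : y ≠ x := fun h => hxl (h ▸ List.mem_cons_self)
    have hxl' : x ∉ l := fun h => hxl (List.mem_cons_of_mem _ h)
    show PySem.Set.update (PySem.Set.add (x :: s) y) l = x :: PySem.Set.update (PySem.Set.add s y) l
    by_cases hys : y ∈ s
    · rw [pvSetAddMem s y hys, pvSetAddMem (x :: s) y (List.mem_cons_of_mem _ hys)]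
      exact ih s hxl' hxs
    · have hyxs : y ∉ x :: s := by
        intro h
        rcases List.mem_cons.mp h with h | h
        · exact hxy h
        · exact hys h
      rw [pvSetAddNotMem s y hys, pvSetAddNotMem (x :: s) y hyxs]
      have : x :: s ++ [y] = x :: (s ++ [y]) := rfl
      rw [this]
      apply ih
      · exact hxl'
      · intro h
        rcases List.mem_append.mp h with h | h
        · exact hxs h
        · have hxy2 : x = y := by simpa using h
          exact hxy hxy2.symm

-- the distinct elements of x :: t are x followed by the distinct elements of t with x removed
theorem pvOfListCons (x : String) (t : List String) :
    PySem.Set.ofList (x :: t) = x :: PySem.Set.ofList (t.filter (fun y => decide (y ≠ x))) := by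
  have h0 : PySem.Set.ofList (x :: t) = PySem.Set.update [x] t := by
    rfl
  rw [h0, ← pvUpdateFilter x t [x] List.mem_cons_self]
  have hx : x ∉ t.filter (fun y => decide (y ≠ x)) := by
    intro h
    have := List.of_mem_filter h
    simp at this
  have : ([x] : List String) = x :: [] := rfl
  rw [this, pvUpdateConsOut x _ [] hx (by simp)]
  rfl

theorem pvCountFilterNe (x h : String) (t : List String) (hne : h ≠ x) :
    List.count h (t.filter (fun y => decide (y ≠ x))) = List.count h t := by
  induction t with
  | nil => rfl
  | cons y t ih =>
    by_cases hy : y = x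
    · subst hy
      rw [List.filter_cons_of_neg (by simp), List.count_cons_of_ne (Ne.symm hne)]
      exact ih
    · rw [List.filter_cons_of_pos (by simp [hy]), List.count_cons, List.count_cons, ih]

-- B's deletion loop computes the same argmax recursion over the distinct hours with their counts
theorem pvLoopBEqArg :
    ∀ (N : Nat) (l : List String), l.length ≤ N → ∀ (m : String) (c : Int),
    pvLoopB l m c
      = pvArg ((PySem.Set.ofList l).map (fun h => (h, (List.count h l : Int)))) m c := by
  intro N
  induction N with
  | zero =>
    intro l hl m c
    have hnil : l = [] := List.length_eq_zero_iff.mp (Nat.le_zero.mp hl)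
    subst hnil
    simp only [pvLoopB]
    rfl
  | succ N ih =>
    intro l hl m c
    match l with
    | [] => simp only [pvLoopB]; rfl
    | x :: t =>
      simp only [pvLoopB]
      have hres : (x :: t).filter (fun y => decide (y ≠ x)) = t.filter (fun y => decide (y ≠ x)) :=
        List.filter_cons_of_neg (by simp)
      rw [hres]
      have hn : ((x :: t).length : Int) - ((t.filter (fun y => decide (y ≠ x))).length : Int)
          = (List.count x (x :: t) : Int) := by
        have h1 := pvLenFilterNe x t
        rw [List.count_cons_self, List.length_cons]
        push_cast
        omega
      have hlen : (t.filter (fun y => decide (y ≠ x))).length ≤ N := by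
        have h2 := List.length_filter_le (fun y => decide (y ≠ x)) t
        have h3 : t.length ≤ N := by simpa using hl
        omega
      rw [hn, pvOfListCons x t, List.map_cons]
      have hmap : (PySem.Set.ofList (t.filter (fun y => decide (y ≠ x)))).map
            (fun h => (h, (List.count h (x :: t) : Int)))
          = (PySem.Set.ofList (t.filter (fun y => decide (y ≠ x)))).map
            (fun h => (h, (List.count h (t.filter (fun y => decide (y ≠ x))) : Int))) := by
        apply List.map_congr_left
        intro h hmem
        have hin : h ∈ t.filter (fun y => decide (y ≠ x)) := by
          have := (PySem.Set.mem_ofList _ _).mp hmem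
          exact this
        have hne : h ≠ x := by
          have := List.of_mem_filter hin
          simpa using this
        rw [List.count_cons_of_ne (Ne.symm hne), pvCountFilterNe x h t hne]
      rw [pvArgCons]
      by_cases hc : c < (List.count x (x :: t) : Int)
      · rw [if_pos hc, if_pos hc, ih _ hlen, hmap]
      · rw [if_neg hc, if_neg hc, ih _ hlen, hmap]

-- ===== VERDICT (by name: the statement is the Claim_ definition above) =====
theorem obtener_hora_pico_spec : Claim_equal_obtener_hora_pico := by
  intro ventas _
  unfold Spec_obtener_hora_pico obtener_hora_pico obtener_hora_pico_alt
  have hA : ventas.foldl (fun (d : PySem.Dict String Int) venta =>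
        if 8 < venta.length ∧ PySem.List.pyGetD venta 8 "" ≠ "" then
          d.modify (PySem.Str.slice (PySem.List.pyGetD venta 8 "") none (some 2)) 0 (fun n => n + 1)
        else d) PySem.Dict.empty
      = ((ventas.filter (fun x => decide (8 < x.length ∧ PySem.List.pyGetD x 8 "" ≠ ""))).map
          (fun venta => PySem.Str.slice (PySem.List.pyGetD venta 8 "") none (some 2))).foldl
          (fun d h => d.modify h 0 (fun n => n + 1)) PySem.Dict.empty :=
    pvFoldlIfComp (fun x => 8 < x.length ∧ PySem.List.pyGetD x 8 "" ≠ "")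
      (fun venta => PySem.Str.slice (PySem.List.pyGetD venta 8 "") none (some 2))
      (fun (d : PySem.Dict String Int) h => d.modify h 0 (fun n => n + 1)) ventas PySem.Dict.empty
  simp only [hA]
  set hs : List String :=
    ((ventas.filter (fun x => decide (8 < x.length ∧ PySem.List.pyGetD x 8 "" ≠ ""))).map
      (fun venta => PySem.Str.slice (PySem.List.pyGetD venta 8 "") none (some 2))) with hhs
  set D : PySem.Dict String Int :=
    hs.foldl (fun d h => d.modify h 0 (fun n => n + 1)) PySem.Dict.empty with hD
  have hkeys : D.keys = PySem.Set.ofList hs := by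
    rw [hD, PySem.Dict.keys_foldl_modify hs 0 (fun _ _ => (fun n => n + 1)) PySem.Dict.empty]
    rfl
  have hgetD : ∀ h, D.getD h 0 = ((List.count h hs : Nat) : Int) := by
    intro h
    rw [hD, PySem.Dict.getD_foldl_modify_add_one hs PySem.Dict.empty h]
    simp [PySem.Dict.getD_empty]
  by_cases hemp : hs = []
  · rw [hemp]
    by_cases hv : ventas = [] <;> simp [hv, hkeys, hemp]
  · have hvne : ventas ≠ [] := by
      intro hv; apply hemp; rw [hhs, hv]; rfl
    obtain ⟨y, t, hyt⟩ := List.exists_cons_of_ne_nil hemp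
    obtain ⟨k, ks, hk⟩ : ∃ k ks, PySem.Set.ofList hs = k :: ks := by
      rw [hyt, pvOfListCons]
      exact ⟨_, _, rfl⟩
    have hkne : D.keys ≠ [] := by rw [hkeys, hk]; simp
    rw [if_neg hvne, if_neg hemp, if_pos hkne]
    -- A's max over the dict keys
    have hkeyfun : (fun h => D.getD h 0) = fun h => ((List.count h hs : Nat) : Int) :=
      funext hgetD
    have hAmax : PySem.List.max? D.keys (fun h => D.getD h 0)
        = some (pvArg (ks.map (fun h => (h, (List.count h hs : Int)))) k (List.count k hs : Int)) := by
      rw [hkeyfun, hkeys, hk, pvMaxEqFoldStep, List.foldl_cons]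
      have h1 : pvStep (fun h => ((List.count h hs : Nat) : Int)) none k = some k := rfl
      rw [h1, pvFoldStepEqArg]
    -- B's deletion loop
    have hBloop : pvLoopB hs "" 0
        = pvArg (ks.map (fun h => (h, (List.count h hs : Int)))) k (List.count k hs : Int) := by
      rw [pvLoopBEqArg hs.length hs (le_refl _), hk, List.map_cons]
      have hkmem : k ∈ hs := by
        have : k ∈ PySem.Set.ofList hs := by rw [hk]; exact List.mem_cons_self
        exact (PySem.Set.mem_ofList _ _).mp this
      have hpos : (0 : Int) < (List.count k hs : Int) := by
        have := List.count_pos_iff.mpr hkmem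
        exact_mod_cast this
      rw [pvArgCons, if_pos hpos]
    rw [hAmax, hBloop, Option.getD_some]
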